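-- pv_equiv track=rewrite | github.com/joaobose/algorithm-design-I-personal | tareas/tarea-4/pregunta-2-implementacion.py | good_subarrays
-- ===== SOURCE A (Python) =====
-- def good_subarrays(A):
--     n = len(A)
--     b = [[0] * (n + 1) for _ in range(n + 1)]
--
--     for j in range(1, n + 1):
--         b[1][j] = j
--
--     for i in range(2, n + 1):
--         for j in range(1, n + 1):
--             b[i][j] = (b[i - 1][j - 1] if A[j - 1] %
--                        i == 0 else 0) + b[i][j - 1]
--
--     return sum(b[i][n] for i in range(1, n + 1))
-- ===== SOURCE B (Python) =====
-- def good_subarrays(A):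
--     # Reverse (adjoint) DP over suffixes: g[i] = number of ways (including the
--     # empty way) to complete a partial subsequence that already has length i
--     # using the remaining suffix.  Sweep backwards, each step building a fresh,
--     # one-shorter row; the answer is the completions of the empty pick minus
--     # the empty completion itself.
--     g = [1] * (len(A) + 1)
--     for v in reversed(A):
--         g = [g[i] + (g[i + 1] if v % (i + 1) == 0 else 0) for i in range(len(g) - 1)]
--     return g[0] - 1
-- ===== Notes on version B (the rewrite author's own statement) =====
-- stated objective: alternative
-- what changed: Replaces A's forward 2D table (row-1 initialization plus a prefix-sum inner loop over positions, counting partial subsequences built so far) by the adjoint/reverse DP: a single backward sweep over suffixes maintaining completion counts (ways to finish a pick of each length), each step producing a fresh one-shorter row; the answer is the completion count of the empty pick minus one; correctness is the forward/backward duality that the pairing sum of forward and backward counts is invariant.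
import Mathlib
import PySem

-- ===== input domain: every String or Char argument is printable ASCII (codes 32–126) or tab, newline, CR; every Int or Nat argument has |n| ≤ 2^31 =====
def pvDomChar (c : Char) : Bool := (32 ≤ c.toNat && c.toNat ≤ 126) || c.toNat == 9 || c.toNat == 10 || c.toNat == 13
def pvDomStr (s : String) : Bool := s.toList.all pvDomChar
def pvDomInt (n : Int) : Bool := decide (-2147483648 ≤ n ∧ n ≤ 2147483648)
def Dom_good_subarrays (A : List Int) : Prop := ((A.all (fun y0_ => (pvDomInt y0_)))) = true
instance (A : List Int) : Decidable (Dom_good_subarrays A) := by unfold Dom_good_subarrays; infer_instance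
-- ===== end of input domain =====

-- B replaces A's forward 2D table by the adjoint (reverse) DP: one backward sweep
-- over suffixes maintaining completion counts, each step a fresh one-shorter row,
-- answer g[0]-1. Same value everywhere; O(n) memory instead of O(n^2).

-- ===== PORT A =====
-- Python's 2D list `b` is List (List Int); b[i][j] = v is a nested List.set,
-- b[i][j] reads via getD (all of A's reads/writes are within the (n+1)×(n+1) table).
def pvSet2 (b : List (List Int)) (i j : Nat) (v : Int) : List (List Int) :=
  b.set i ((b.getD i []).set j v)

def pvGet2 (b : List (List Int)) (i j : Nat) : Int :=
  (b.getD i []).getD j 0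

-- one step of A's inner `for j in range(1, n+1)` body, for row i (kj = j - 1)
def pvInnerA (A : List Int) (i : Nat) (b : List (List Int)) (kj : Nat) : List (List Int) :=
  let j := kj + 1
  pvSet2 b i j ((if PySem.Int.mod (A.getD (j-1) 0) (i : Int) == 0 then pvGet2 b (i-1) (j-1) else 0) + pvGet2 b i (j-1))

-- one iteration of A's outer `for i in range(2, n+1)` loop (ki = i - 2)
def pvRowA (A : List Int) (b : List (List Int)) (ki : Nat) : List (List Int) :=
  (List.range A.length).foldl (pvInnerA A (ki + 2)) b

def good_subarrays (A : List Int) : Int :=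
  let n := A.length
  -- b = [[0] * (n + 1) for _ in range(n + 1)]
  let b0 : List (List Int) := List.replicate (n+1) (List.replicate (n+1) (0:Int))
  -- for j in range(1, n + 1): b[1][j] = j
  let b1 := (List.range n).foldl (fun b k => pvSet2 b 1 (k+1) ((k : Int) + 1)) b0
  -- for i in range(2, n + 1): for j in range(1, n + 1): b[i][j] = ...
  let b2 := (List.range (n - 1)).foldl (pvRowA A) b1
  -- sum(b[i][n] for i in range(1, n + 1))
  ((List.range n).map (fun k => pvGet2 b2 (k+1) n)).sum

-- ===== PORT B =====
-- one backward step of B: g = [g[i] + (g[i+1] if v % (i+1) == 0 else 0) for i in range(len(g)-1)]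
def pvStepB (g : List Int) (v : Int) : List Int :=
  (List.range (g.length - 1)).map
    (fun i => g.getD i 0 + (if PySem.Int.mod v ((i : Int) + 1) == 0 then g.getD (i+1) 0 else 0))

def good_subarrays_alt (A : List Int) : Int :=
  -- g = [1] * (len(A) + 1); for v in reversed(A): g = [...]
  let g := A.reverse.foldl pvStepB (List.replicate (A.length + 1) (1 : Int))
  -- return g[0] - 1
  g.getD 0 0 - 1

-- ===== PRECONDITION & SPEC =====
def Spec_good_subarrays (A : List Int) (out : Int) : Prop := out = good_subarrays_alt A
instance (A : List Int) (out : Int) : Decidable (Spec_good_subarrays A out) := by unfold Spec_good_subarrays; infer_instance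

-- ===== CLAIM (what is proved, stated in full; the proofs are below) =====
def Claim_equal_good_subarrays : Prop := ∀ (A : List Int), Dom_good_subarrays A → Spec_good_subarrays A (good_subarrays A)

-- ===== LEMMAS AND PROOFS =====

-- the forward count: pvT A i j = number of "good" length-i subsequences of the first j elements
def pvT (A : List Int) : Nat → Nat → Int
  | 0, _ => 1
  | _+1, 0 => 0
  | i+1, j+1 =>
      (if PySem.Int.mod (A.getD j 0) ((i : Int) + 1) == 0 then pvT A i j else 0) + pvT A (i+1) j

-- the backward count: pvGl s i = number of ways (incl. empty) to complete a length-i pick using s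
def pvGl : List Int → Nat → Int
  | [], _ => 1
  | v :: s, i => pvGl s i + (if PySem.Int.mod v ((i : Int) + 1) == 0 then pvGl s (i+1) else 0)

theorem pvT_zero_of_lt (A : List Int) : ∀ (j i : Nat), j < i → pvT A i j = 0 := by
  intro j
  induction j with
  | zero => intro i hi; cases i with
    | zero => omega
    | succ i' => simp [pvT]
  | succ j ih =>
    intro i hi
    cases i with
    | zero => omega
    | succ i' =>
      have h1 : pvT A i' j = 0 := ih i' (by omega)
      have h2 : pvT A (i'+1) j = 0 := ih (i'+1) (by omega)
      simp [pvT, h1, h2]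

theorem pvT_one (A : List Int) : ∀ (j : Nat), pvT A 1 j = (j : Int) := by
  intro j
  induction j with
  | zero => simp [pvT]
  | succ j ih =>
    simp [pvT, ih]; ring

-- getD-facing view of List.set
theorem getD_set_self (l : List Int) (i : Nat) (v : Int) (h : i < l.length) :
    (l.set i v).getD i 0 = v := by
  simp [List.getD_eq_getElem?_getD, List.getElem?_set_self h]

theorem getD_set_ne (l : List Int) (i i' : Nat) (v : Int) (h : i' ≠ i) :
    (l.set i v).getD i' 0 = l.getD i' 0 := by
  simp [List.getD_eq_getElem?_getD, List.getElem?_set_ne (by omega : i ≠ i')]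

-- ----- B side: the backward sweep computes pvGl -----

theorem stepB_length (g : List Int) (v : Int) : (pvStepB g v).length = g.length - 1 := by
  simp [pvStepB]

theorem stepB_getD (g : List Int) (v : Int) (i : Nat) (hi : i < g.length - 1) :
    (pvStepB g v).getD i 0
      = g.getD i 0 + (if PySem.Int.mod v ((i : Int) + 1) == 0 then g.getD (i+1) 0 else 0) := by
  unfold pvStepB
  rw [List.getD_eq_getElem?_getD,
    List.getElem?_map, List.getElem?_range hi]
  rfl

theorem foldB_eval :
    ∀ (s : List Int) (g : List Int), s.length < g.length →
      (∀ i, i < g.length → g.getD i 0 = pvGl [] i) →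
      (s.reverse.foldl pvStepB g).length = g.length - s.length ∧
      (∀ i, i < g.length - s.length → (s.reverse.foldl pvStepB g).getD i 0 = pvGl s i) := by
  intro s
  induction s with
  | nil =>
    intro g _ hg
    exact ⟨by simp, fun i hi => by simpa using hg i (by simpa using hi)⟩
  | cons v s ih =>
    intro g hlen hg
    have hlen' : s.length < g.length := by simp at hlen; omega
    obtain ⟨ihlen, ihval⟩ := ih g hlen' hg
    have hfold : (v :: s).reverse.foldl pvStepB g = pvStepB (s.reverse.foldl pvStepB g) v := by
      simp [List.foldl_append]
    constructor
    · rw [hfold, stepB_length, ihlen]; simp; omega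
    · intro i hi
      have hlen2 : g.length - s.length = (g.length - (v :: s).length) + 1 := by
        simp at hi ⊢; omega
      have hi1 : i < (s.reverse.foldl pvStepB g).length - 1 := by
        rw [ihlen]; simp at hi; omega
      rw [hfold, stepB_getD _ _ _ hi1,
        ihval i (by simp at hi; omega), ihval (i+1) (by simp at hi; omega)]
      rfl

theorem alt_eval (A : List Int) : good_subarrays_alt A = pvGl A 0 - 1 := by
  unfold good_subarrays_alt
  have h := foldB_eval A (List.replicate (A.length + 1) (1 : Int))
    (by simp)
    (by intro i hi
        simp only [List.length_replicate] at hi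
        simp [List.getD_eq_getElem?_getD, List.getElem?_replicate, hi, pvGl])
  have h0 := h.2 0 (by simp)
  show (A.reverse.foldl pvStepB (List.replicate (A.length + 1) (1 : Int))).getD 0 0 - 1 = _
  rw [h0]

-- ----- the adjoint identity: forward counts pair with backward counts -----

theorem drop_eq_getD_cons (A : List Int) (j : Nat) (hj : j < A.length) :
    A.drop j = A.getD j 0 :: A.drop (j+1) := by
  rw [List.getD_eq_getElem?_getD, List.getElem?_eq_getElem hj]
  exact List.drop_eq_getElem_cons hj

-- one backward step preserves the pairing sum
theorem pair_step (A : List Int) (j : Nat) (hj : j < A.length) :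
    ∑ i ∈ Finset.range (A.length + 2), pvT A i j * pvGl (A.drop j) i
      = ∑ i ∈ Finset.range (A.length + 2), pvT A i (j+1) * pvGl (A.drop (j+1)) i := by
  set n := A.length with hn
  set v := A.getD j 0 with hv
  have hdrop : A.drop j = v :: A.drop (j+1) := drop_eq_getD_cons A j hj
  -- expand the left side via pvGl's cons equation
  have hL : ∀ i, pvT A i j * pvGl (A.drop j) i
      = pvT A i j * pvGl (A.drop (j+1)) i
        + pvT A i j * (if PySem.Int.mod v ((i : Int) + 1) == 0 then pvGl (A.drop (j+1)) (i+1) else 0) := by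
    intro i
    rw [hdrop]
    show pvT A i j * (pvGl (A.drop (j+1)) i
        + (if PySem.Int.mod v ((i : Int) + 1) == 0 then pvGl (A.drop (j+1)) (i+1) else 0)) = _
    ring
  -- expand the right side via pvT's succ equation
  have hR : ∀ i, pvT A (i+1) (j+1) * pvGl (A.drop (j+1)) (i+1)
      = (if PySem.Int.mod v ((i : Int) + 1) == 0 then pvT A i j else 0) * pvGl (A.drop (j+1)) (i+1)
        + pvT A (i+1) j * pvGl (A.drop (j+1)) (i+1) := by
    intro i
    show ((if PySem.Int.mod (A.getD j 0) ((i : Int) + 1) == 0 then pvT A i j else 0) + pvT A (i+1) j)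
        * pvGl (A.drop (j+1)) (i+1) = _
    rw [← hv]; ring
  calc ∑ i ∈ Finset.range (n + 2), pvT A i j * pvGl (A.drop j) i
      = ∑ i ∈ Finset.range (n + 2), pvT A i j * pvGl (A.drop (j+1)) i
        + ∑ i ∈ Finset.range (n + 2),
            pvT A i j * (if PySem.Int.mod v ((i : Int) + 1) == 0 then pvGl (A.drop (j+1)) (i+1) else 0) := by
        rw [← Finset.sum_add_distrib]
        exact Finset.sum_congr rfl (fun i _ => hL i)
    _ = ∑ i ∈ Finset.range (n + 2), pvT A i j * pvGl (A.drop (j+1)) i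
        + ∑ i ∈ Finset.range (n + 1),
            pvT A i j * (if PySem.Int.mod v ((i : Int) + 1) == 0 then pvGl (A.drop (j+1)) (i+1) else 0) := by
        congr 1
        rw [Finset.sum_range_succ, pvT_zero_of_lt A j (n+1) (by omega)]
        ring
    _ = ∑ i ∈ Finset.range (n + 2), pvT A i (j+1) * pvGl (A.drop (j+1)) i := by
        rw [Finset.sum_range_succ' (fun i => pvT A i (j+1) * pvGl (A.drop (j+1)) i) (n+1)]
        have hT0 : pvT A 0 (j+1) = 1 := rfl
        have hT0' : pvT A 0 j = 1 := by cases j <;> rfl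
        rw [hT0]
        have hsplit : ∑ i ∈ Finset.range (n + 1), pvT A (i+1) (j+1) * pvGl (A.drop (j+1)) (i+1)
            = ∑ i ∈ Finset.range (n + 1),
                ((if PySem.Int.mod v ((i : Int) + 1) == 0 then pvT A i j else 0) * pvGl (A.drop (j+1)) (i+1)
                  + pvT A (i+1) j * pvGl (A.drop (j+1)) (i+1)) :=
          Finset.sum_congr rfl (fun i _ => hR i)
        rw [hsplit, Finset.sum_add_distrib]
        have e1 : ∑ i ∈ Finset.range (n + 1),
            (if PySem.Int.mod v ((i : Int) + 1) == 0 then pvT A i j else 0) * pvGl (A.drop (j+1)) (i+1)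
            = ∑ i ∈ Finset.range (n + 1),
            pvT A i j * (if PySem.Int.mod v ((i : Int) + 1) == 0 then pvGl (A.drop (j+1)) (i+1) else 0) := by
          refine Finset.sum_congr rfl (fun i _ => ?_)
          by_cases h : (PySem.Int.mod v ((i : Int) + 1) == 0) = true
          · simp [h]
          · simp only [Bool.not_eq_true] at h
            simp [h]
        have e2 : ∑ i ∈ Finset.range (n + 2), pvT A i j * pvGl (A.drop (j+1)) i
            = pvT A 0 j * pvGl (A.drop (j+1)) 0
              + ∑ i ∈ Finset.range (n + 1), pvT A (i+1) j * pvGl (A.drop (j+1)) (i+1) := by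
          rw [Finset.sum_range_succ' (fun i => pvT A i j * pvGl (A.drop (j+1)) i) (n+1)]
          ring
        rw [e1, e2, hT0']
        ring

-- chaining: the pairing sum from j to n
theorem pair_chain (A : List Int) :
    ∀ (m j : Nat), j + m = A.length →
      ∑ i ∈ Finset.range (A.length + 2), pvT A i j * pvGl (A.drop j) i
        = ∑ i ∈ Finset.range (A.length + 2), pvT A i A.length * pvGl (A.drop A.length) i := by
  intro m
  induction m with
  | zero => intro j hj; rw [show j = A.length by omega]
  | succ m ih =>
    intro j hj
    rw [pair_step A j (by omega)]
    exact ih (j+1) (by omega)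

-- A's closed form equals B's closed form
theorem sum_eq_pvGl (A : List Int) :
    ((List.range A.length).map (fun k => pvT A (k+1) A.length)).sum = pvGl A 0 - 1 := by
  set n := A.length with hn
  have hchain := pair_chain A n 0 (by omega)
  have hS0 : ∑ i ∈ Finset.range (n + 2), pvT A i 0 * pvGl (A.drop 0) i = pvGl A 0 := by
    rw [Finset.sum_range_succ' (fun i => pvT A i 0 * pvGl (A.drop 0) i) (n+1)]
    have hz : ∑ i ∈ Finset.range (n + 1), pvT A (i+1) 0 * pvGl (A.drop 0) (i+1) = 0 :=
      Finset.sum_eq_zero (fun i _ => by rw [show pvT A (i+1) 0 = 0 from rfl]; ring)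
    rw [hz]
    show 0 + pvT A 0 0 * pvGl A 0 = pvGl A 0
    rw [show pvT A 0 0 = 1 from rfl]; ring
  have hdropn : A.drop n = [] := by simp [hn]
  have hSn : ∑ i ∈ Finset.range (n + 2), pvT A i n * pvGl (A.drop n) i
      = 1 + ∑ k ∈ Finset.range n, pvT A (k+1) n := by
    rw [hdropn]
    have : ∀ i, pvT A i n * pvGl ([] : List Int) i = pvT A i n := by
      intro i; show pvT A i n * 1 = pvT A i n; ring
    rw [Finset.sum_congr rfl (fun i _ => this i),
      Finset.sum_range_succ, pvT_zero_of_lt A n (n+1) (by omega),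
      Finset.sum_range_succ' (fun i => pvT A i n) n,
      show pvT A 0 n = 1 by cases n <;> rfl]
    ring
  have hmap : ∀ m, ((List.range m).map (fun k => pvT A (k+1) n)).sum
      = ∑ k ∈ Finset.range m, pvT A (k+1) n := by
    intro m
    induction m with
    | zero => simp
    | succ m ih =>
      rw [List.range_succ, List.map_append, List.sum_append, Finset.sum_range_succ, ih]
      simp
  rw [hmap n]
  have := hchain
  rw [hS0, hSn] at this
  omega

-- ----- A side (2D table evaluates to pvT) -----

-- table shape invariant: n+1 rows of length n+1
def pvShape (n : Nat) (b : List (List Int)) : Prop :=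
  b.length = n + 1 ∧ ∀ r ∈ b, r.length = n + 1

theorem getD_mem_of_lt (b : List (List Int)) (i : Nat) (hi : i < b.length) :
    b.getD i [] ∈ b := by
  have : b.getD i [] = b[i] := by
    simp [List.getD_eq_getElem?_getD, List.getElem?_eq_getElem hi]
  rw [this]
  exact List.getElem_mem hi

theorem shape_set2 (n : Nat) (b : List (List Int)) (i j : Nat) (v : Int)
    (hb : pvShape n b) : pvShape n (pvSet2 b i j v) := by
  obtain ⟨hl, hr⟩ := hb
  rcases Nat.lt_or_ge i b.length with hi | hi
  · constructor
    · simp [pvSet2, hl]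
    · intro r hrmem
      rcases List.mem_or_eq_of_mem_set hrmem with h | h
      · exact hr r h
      · subst h
        rw [List.length_set]
        exact hr _ (getD_mem_of_lt b i hi)
  · unfold pvSet2
    rw [List.set_eq_of_length_le (by omega)]
    exact ⟨hl, hr⟩

theorem get2_set2_self (n : Nat) (b : List (List Int)) (i j : Nat) (v : Int)
    (hb : pvShape n b) (hi : i ≤ n) (hj : j ≤ n) :
    pvGet2 (pvSet2 b i j v) i j = v := by
  obtain ⟨hl, hr⟩ := hb
  have hib : i < b.length := by omega
  have hrow : (b.getD i []).length = n + 1 := hr _ (getD_mem_of_lt b i hib)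
  unfold pvGet2 pvSet2
  rw [show (b.set i ((b.getD i []).set j v)).getD i []
      = (b.getD i []).set j v by
    simp [List.getD_eq_getElem?_getD, List.getElem?_set_self (by simpa using hib)]]
  exact getD_set_self _ j v (by omega)

theorem get2_set2_ne (n : Nat) (b : List (List Int)) (i j i' j' : Nat) (v : Int)
    (hb : pvShape n b) (hne : ¬ (i' = i ∧ j' = j)) :
    pvGet2 (pvSet2 b i j v) i' j' = pvGet2 b i' j' := by
  unfold pvGet2 pvSet2
  by_cases hii : i' = i
  · subst hii
    have hj' : j' ≠ j := fun h => hne ⟨rfl, h⟩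
    rcases Nat.lt_or_ge i' b.length with hib | hib
    · rw [show (b.set i' ((b.getD i' []).set j v)).getD i' []
          = (b.getD i' []).set j v by
        simp [List.getD_eq_getElem?_getD, List.getElem?_set_self (by simpa using hib)]]
      exact getD_set_ne _ j j' v hj'
    · rw [List.set_eq_of_length_le (by omega)]
  · rw [show (b.set i ((b.getD i []).set j v)).getD i' []
        = b.getD i' [] by
      simp [List.getD_eq_getElem?_getD, List.getElem?_set_ne (by omega : i ≠ i')]]

theorem get2_replicate (n : Nat) (i j : Nat) :
    pvGet2 (List.replicate (n+1) (List.replicate (n+1) (0:Int))) i j = 0 := by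
  unfold pvGet2
  rcases Nat.lt_or_ge i (n+1) with hi | hi
  · rw [show (List.replicate (n+1) (List.replicate (n+1) (0:Int))).getD i []
        = List.replicate (n+1) (0:Int) by
      simp [List.getD_eq_getElem?_getD, List.getElem?_replicate, hi]]
    rcases Nat.lt_or_ge j (n+1) with hj | hj
    · simp [List.getD_eq_getElem?_getD, List.getElem?_replicate, hj]
    · rw [List.getD_eq_getElem?_getD,
         List.getElem?_eq_none (l := List.replicate (n+1) (0:Int)) (i := j) (by simpa using hj)]
      rfl
  · rw [show (List.replicate (n+1) (List.replicate (n+1) (0:Int))).getD i [] = [] by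
      rw [List.getD_eq_getElem?_getD,
        List.getElem?_eq_none (l := List.replicate (n+1) (List.replicate (n+1) (0:Int)))
          (i := i) (by simpa using hi)]
      rfl]
    rfl

theorem shape_replicate (n : Nat) :
    pvShape n (List.replicate (n+1) (List.replicate (n+1) (0:Int))) := by
  constructor
  · simp
  · intro r hr
    rw [List.eq_of_mem_replicate hr]
    simp

-- A's row-1 initialization loop
theorem b1_eval (n : Nat) :
    ∀ (m : Nat), m ≤ n → ∀ (b : List (List Int)), pvShape n b → ∀ (i' j' : Nat),
      pvGet2 ((List.range m).foldl (fun b k => pvSet2 b 1 (k+1) ((k : Int) + 1)) b) i' j'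
        = if i' = 1 ∧ 1 ≤ j' ∧ j' ≤ m then (j' : Int) else pvGet2 b i' j' := by
  intro m
  induction m with
  | zero =>
    intro _ b _ i' j'
    have : ¬ (i' = 1 ∧ 1 ≤ j' ∧ j' ≤ 0) := by omega
    rw [if_neg this]
    simp
  | succ m ih =>
    intro hm b hb i' j'
    rw [List.range_succ, List.foldl_append, List.foldl_cons, List.foldl_nil]
    have hbm : pvShape n ((List.range m).foldl (fun b k => pvSet2 b 1 (k+1) ((k : Int) + 1)) b) := by
      clear ih
      induction (List.range m) generalizing b with
      | nil => exact hb
      | cons k l ihl => exact ihl _ (shape_set2 n b 1 (k+1) _ hb)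
    by_cases hij : i' = 1 ∧ j' = m + 1
    · obtain ⟨hi, hj⟩ := hij
      subst hi; subst hj
      rw [get2_set2_self n _ 1 (m+1) _ hbm (by omega) (by omega)]
      rw [if_pos (by omega)]
      push_cast; ring
    · rw [get2_set2_ne n _ 1 (m+1) i' j' _ hbm hij, ih (by omega) b hb i' j']
      by_cases hin : i' = 1 ∧ 1 ≤ j' ∧ j' ≤ m
      · rw [if_pos hin, if_pos (by omega)]
      · have : ¬ (i' = 1 ∧ 1 ≤ j' ∧ j' ≤ m + 1) := by
          rcases eq_or_ne i' 1 with h | h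
          · intro hcon; exact hij ⟨h, by omega⟩
          · intro hcon; exact h hcon.1
        rw [if_neg hin, if_neg this]

theorem shape_foldl_innerA (A : List Int) (n t : Nat) :
    ∀ (l : List Nat) (b : List (List Int)), pvShape n b →
      pvShape n (l.foldl (pvInnerA A t) b) := by
  intro l
  induction l with
  | nil => intro b hb; exact hb
  | cons k l ih =>
    intro b hb
    exact ih _ (shape_set2 n b t (k+1) _ hb)

-- A's inner column loop for row t+2, given rows 1..t+1 already hold pvT
theorem innerA_eval (A : List Int) (n : Nat) (hn : n = A.length) (t : Nat) (ht : t + 2 ≤ n)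
    (b : List (List Int)) (hb : pvShape n b)
    (Hb : ∀ i' j', pvGet2 b i' j' = if 1 ≤ i' ∧ i' ≤ t+1 ∧ 1 ≤ j' ∧ j' ≤ n then pvT A i' j' else 0) :
    ∀ (m : Nat), m ≤ n → ∀ i' j',
      pvGet2 ((List.range m).foldl (pvInnerA A (t+2)) b) i' j'
        = if i' = t+2 ∧ 1 ≤ j' ∧ j' ≤ m then pvT A (t+2) j' else pvGet2 b i' j' := by
  intro m
  induction m with
  | zero =>
    intro _ i' j'
    have : ¬ (i' = t+2 ∧ 1 ≤ j' ∧ j' ≤ 0) := by omega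
    rw [if_neg this]
    simp
  | succ m ih =>
    intro hm i' j'
    have hm' : m ≤ n := by omega
    rw [List.range_succ, List.foldl_append, List.foldl_cons, List.foldl_nil]
    have hbm : pvShape n ((List.range m).foldl (pvInnerA A (t+2)) b) :=
      shape_foldl_innerA A n (t+2) (List.range m) b hb
    have f1 : pvGet2 ((List.range m).foldl (pvInnerA A (t+2)) b) (t+1) m = pvT A (t+1) m := by
      rw [ih hm' (t+1) m, if_neg (by omega), Hb (t+1) m]
      cases m with
      | zero => simp [pvT]
      | succ m' => rw [if_pos (by omega)]
    have f2 : pvGet2 ((List.range m).foldl (pvInnerA A (t+2)) b) (t+2) m = pvT A (t+2) m := by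
      rw [ih hm' (t+2) m]
      cases m with
      | zero => rw [if_neg (by omega), Hb (t+2) 0, if_neg (by omega)]; simp [pvT]
      | succ m' => rw [if_pos (by omega)]
    have hc : ((t+2 : Nat) : Int) = ((t+1 : Nat) : Int) + 1 := by push_cast; ring
    have hval : (if PySem.Int.mod (A.getD m 0) ((t+2 : Nat) : Int) == 0
          then pvGet2 ((List.range m).foldl (pvInnerA A (t+2)) b) (t+1) m else 0)
          + pvGet2 ((List.range m).foldl (pvInnerA A (t+2)) b) (t+2) m
        = pvT A (t+2) (m+1) := by
      simp only [pvT]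
      rw [f1, f2, hc]
    by_cases hij : i' = t+2 ∧ j' = m+1
    · obtain ⟨hi, hj⟩ := hij
      subst hi; subst hj
      have e1 : t + 2 - 1 = t + 1 := by omega
      simp only [pvInnerA, e1, Nat.add_sub_cancel]
      have hi2 : t + 2 ≤ n := ht
      have hj2 : m + 1 ≤ n := hm
      rw [get2_set2_self n _ (t+2) (m+1) _ hbm hi2 hj2, hval]
      simp
    · have hstep : pvGet2 (pvInnerA A (t+2) ((List.range m).foldl (pvInnerA A (t+2)) b) m) i' j'
          = pvGet2 ((List.range m).foldl (pvInnerA A (t+2)) b) i' j' := by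
        simp only [pvInnerA]
        exact get2_set2_ne n _ (t+2) (m+1) i' j' _ hbm hij
      rw [hstep, ih hm' i' j']
      by_cases hin : i' = t+2 ∧ 1 ≤ j' ∧ j' ≤ m
      · rw [if_pos hin, if_pos (by omega)]
      · have : ¬ (i' = t+2 ∧ 1 ≤ j' ∧ j' ≤ m + 1) := by
          rcases eq_or_ne i' (t+2) with h | h
          · intro hcon; exact hij ⟨h, by omega⟩
          · intro hcon; exact h hcon.1
        rw [if_neg hin, if_neg this]

theorem shape_foldl_rowA (A : List Int) (n : Nat) :
    ∀ (l : List Nat) (b : List (List Int)), pvShape n b →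
      pvShape n (l.foldl (pvRowA A) b) := by
  intro l
  induction l with
  | nil => intro b hb; exact hb
  | cons k l ih =>
    intro b hb
    exact ih _ (shape_foldl_innerA A n (k+2) (List.range A.length) b hb)

-- A's outer row loop: after r rows, rows 1..r+1 hold pvT, everything else is 0
theorem rowsA_eval (A : List Int) (n : Nat) (hn : n = A.length) :
    ∀ (r : Nat), r + 1 ≤ n → ∀ (b : List (List Int)), pvShape n b →
      (∀ i' j', pvGet2 b i' j' = if 1 ≤ i' ∧ i' ≤ 1 ∧ 1 ≤ j' ∧ j' ≤ n then pvT A i' j' else 0) →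
      ∀ i' j', pvGet2 ((List.range r).foldl (pvRowA A) b) i' j'
        = if 1 ≤ i' ∧ i' ≤ r+1 ∧ 1 ≤ j' ∧ j' ≤ n then pvT A i' j' else 0 := by
  intro r
  induction r with
  | zero =>
    intro _ b _ Hb i' j'
    simpa using Hb i' j'
  | succ r ih =>
    intro hr b hb Hb i' j'
    rw [List.range_succ, List.foldl_append, List.foldl_cons, List.foldl_nil]
    have hbr : pvShape n ((List.range r).foldl (pvRowA A) b) :=
      shape_foldl_rowA A n (List.range r) b hb
    have hrows := ih (by omega) b hb Hb
    have hin := innerA_eval A n hn r (by omega) _ hbr hrows n (le_refl _)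
    rw [show pvRowA A (List.foldl (pvRowA A) b (List.range r)) r
        = List.foldl (pvInnerA A (r+2)) (List.foldl (pvRowA A) b (List.range r))
            (List.range A.length) from rfl, ← hn]
    rw [hin i' j']
    by_cases hij : i' = r + 2 ∧ 1 ≤ j' ∧ j' ≤ n
    · rw [if_pos hij, if_pos (by omega), hij.1]
    · rw [if_neg hij, hrows i' j']
      by_cases hold : 1 ≤ i' ∧ i' ≤ r + 1 ∧ 1 ≤ j' ∧ j' ≤ n
      · rw [if_pos hold, if_pos (by omega)]
      · rw [if_neg hold, if_neg (by omega)]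

-- closed form of port A
theorem a_eval (A : List Int) :
    good_subarrays A = ((List.range A.length).map (fun k => pvT A (k+1) A.length)).sum := by
  simp only [good_subarrays]
  congr 1
  apply List.map_congr_left
  intro k hk
  have hk' : k < A.length := List.mem_range.mp hk
  have hn1 : 1 ≤ A.length := by omega
  have hshape0 := shape_replicate A.length
  have hbase : ∀ i' j',
      pvGet2 ((List.range A.length).foldl (fun b k => pvSet2 b 1 (k+1) ((k : Int) + 1))
          (List.replicate (A.length+1) (List.replicate (A.length+1) (0:Int)))) i' j'
        = if 1 ≤ i' ∧ i' ≤ 1 ∧ 1 ≤ j' ∧ j' ≤ A.length then pvT A i' j' else 0 := by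
    intro i' j'
    rw [b1_eval A.length A.length (le_refl _) _ hshape0 i' j']
    by_cases h : i' = 1 ∧ 1 ≤ j' ∧ j' ≤ A.length
    · rw [if_pos h, if_pos (by omega), h.1, pvT_one]
    · rw [if_neg h, if_neg (by omega), get2_replicate]
  have hshape1 : pvShape A.length
      ((List.range A.length).foldl (fun b k => pvSet2 b 1 (k+1) ((k : Int) + 1))
          (List.replicate (A.length+1) (List.replicate (A.length+1) (0:Int)))) := by
    have hgen : ∀ (l : List Nat) (b : List (List Int)), pvShape A.length b →
        pvShape A.length (l.foldl (fun b k => pvSet2 b 1 (k+1) ((k : Int) + 1)) b) := by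
      intro l
      induction l with
      | nil => intro b hb2; exact hb2
      | cons x l ihl => intro b hb2; exact ihl _ (shape_set2 _ _ _ _ _ hb2)
    exact hgen _ _ hshape0
  rw [rowsA_eval A A.length rfl (A.length - 1) (by omega) _ hshape1 hbase (k+1) A.length,
      if_pos (by omega)]

-- ===== VERDICT (by name: the statement is the Claim_ definition above) =====
theorem good_subarrays_spec : Claim_equal_good_subarrays := by
  intro A _
  unfold Spec_good_subarrays
  rw [a_eval, alt_eval, sum_eq_pvGl]
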